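-- pv_equiv track=rewrite | github.com/amandaskaugerud/INF100 | lab7/uke_07_oppg_5.py | find_underscores
-- ===== SOURCE A (Python) =====
-- def find_underscores(liste,shift):
--     # variabler som skal telle antall dansetrinn
--     count_dancemoves = 0
--     # løper gjennom listen med hensyn på kolonnen
--     for col in range(len(liste[0])):
--         count_underscore = 0
--         for row in range(len(liste)):
--             # sjekker om et tegn er underscore
--             if liste[row][col] == "_":
--                 # teller antall underscore
--                 count_underscore += 1
--             # om hele kolonnen består av kun underscore
--             if count_underscore == shift:
--                 # legger til 1 i antall dansetrinn
--                 count_dancemoves += 1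
--     return (count_dancemoves + 1)
-- ===== SOURCE B (Python) =====
-- def find_underscores(liste, shift):
--     # Per column, record the row positions of the underscores; the running
--     # underscore count equals shift exactly on the rows between the shift-th
--     # and (shift+1)-th occurrence, so each column's contribution is a single
--     # difference of occurrence positions instead of a row-by-row tally.
--     n = len(liste)
--     total = 0
--     for c in range(len(liste[0])):
--         idx = [r for r in range(n) if liste[r][c] == "_"]
--         if 0 <= shift <= len(idx):
--             hi = idx[shift] if shift < len(idx) else n
--             lo = idx[shift - 1] if shift >= 1 else 0
--             total += hi - lo
--     return total + 1
-- ===== Notes on version B (the rewrite author's own statement) =====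
-- stated objective: alternative
-- what changed: Instead of scanning every row of a column with a running counter and testing it against shift at each row, B collects each column's underscore row positions once and gets that column's hit count in O(1) as the difference between the shift-th occurrence position (or the row count) and the (shift-1)-th, since the running count equals shift exactly on the rows between consecutive occurrences.
import Mathlib
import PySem

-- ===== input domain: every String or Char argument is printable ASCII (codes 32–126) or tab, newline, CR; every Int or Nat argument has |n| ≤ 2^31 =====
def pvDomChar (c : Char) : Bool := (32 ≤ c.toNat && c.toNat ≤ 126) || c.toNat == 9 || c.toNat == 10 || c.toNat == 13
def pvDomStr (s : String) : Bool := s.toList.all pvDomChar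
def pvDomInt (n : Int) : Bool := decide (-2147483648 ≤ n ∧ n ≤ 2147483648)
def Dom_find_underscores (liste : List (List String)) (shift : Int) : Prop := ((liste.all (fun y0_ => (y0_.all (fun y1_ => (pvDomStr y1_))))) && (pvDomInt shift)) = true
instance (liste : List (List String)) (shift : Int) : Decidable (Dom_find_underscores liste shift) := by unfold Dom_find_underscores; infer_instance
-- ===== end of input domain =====

-- B replaces A's per-row running-counter comparison by the list of underscore
-- row positions per column, reading each column's hit count off as a single
-- difference of occurrence positions (objective: alternative).

-- ===== PORT A =====
-- liste[0] raises IndexError on empty liste, and liste[row][col] raises when a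
-- row is shorter than liste[0]; Pre_ excludes exactly those inputs, so the
-- getD defaults below never fire on admitted inputs.
def find_underscores (liste : List (List String)) (shift : Int) : Int :=
  ((List.range (liste.headD []).length).foldl
    (fun count_dancemoves col =>
      ((List.range liste.length).foldl
        (fun (st : Int × Int) row =>
          let count_underscore :=
            st.1 + (if (liste.getD row []).getD col "" = "_" then (1 : Int) else 0)
          (count_underscore,
            st.2 + (if count_underscore = shift then (1 : Int) else 0)))
        ((0 : Int), count_dancemoves)).2)
    (0 : Int)) + 1

-- ===== PORT B =====
-- idx[shift] / idx[shift-1] are only evaluated under the guard 0 ≤ shift ≤ len(idx)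
-- (and shift ≥ 1 for the latter), so shift.toNat is exact and getD is in range.
def find_underscores_alt (liste : List (List String)) (shift : Int) : Int :=
  let n := liste.length
  ((List.range (liste.headD []).length).foldl
    (fun total c =>
      let idx := (List.range n).filter (fun r => (liste.getD r []).getD c "" == "_")
      if 0 ≤ shift ∧ shift ≤ (idx.length : Int) then
        total +
          ((if shift < (idx.length : Int) then ((idx.getD shift.toNat 0 : Nat) : Int) else (n : Int))
            - (if 1 ≤ shift then ((idx.getD (shift.toNat - 1) 0 : Nat) : Int) else 0))
      else total)
    (0 : Int)) + 1

-- ===== PRECONDITION & SPEC =====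
-- Pre_ excludes exactly the inputs on which the Pythons raise IndexError: the
-- empty list (liste[0]) and grids where some row is shorter than the first row.
def Pre_find_underscores (liste : List (List String)) (shift : Int) : Prop :=
  liste ≠ [] ∧ ∀ r ∈ liste, (liste.headD []).length ≤ r.length
instance (liste : List (List String)) (shift : Int) : Decidable (Pre_find_underscores liste shift) := by unfold Pre_find_underscores; infer_instance

def pvWitness_find_underscores : List (List String) × Int := ([["_", "a"], ["_", "_"]], 2)

def Spec_find_underscores (liste : List (List String)) (shift : Int) (out : Int) : Prop := out = find_underscores_alt liste shift
instance (liste : List (List String)) (shift : Int) (out : Int) : Decidable (Spec_find_underscores liste shift out) := by unfold Spec_find_underscores; infer_instance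

-- ===== CLAIM (what is proved, stated in full; the proofs are below) =====
def Claim_equal_find_underscores : Prop := ∀ (liste : List (List String)) (shift : Int), Dom_find_underscores liste shift → Pre_find_underscores liste shift → Spec_find_underscores liste shift (find_underscores liste shift)

-- ===== LEMMAS AND PROOFS =====

-- The running prefix counts of underscores down a column (Int accumulator, A's view).
def pvPrefixes (p : Int) : List String → List Int
  | [] => []
  | ch :: t =>
    let q := p + (if ch = "_" then (1 : Int) else 0)
    q :: pvPrefixes q t

-- Same prefix counts with a Nat accumulator.
def pvPrefN (p : Nat) : List String → List Nat
  | [] => []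
  | ch :: t =>
    let q := p + (if ch = "_" then 1 else 0)
    q :: pvPrefN q t

-- Row positions of the elements satisfying p.
def pvIdxN (p : String → Bool) : List String → List Nat
  | [] => []
  | ch :: t => if p ch then 0 :: (pvIdxN p t).map (· + 1) else (pvIdxN p t).map (· + 1)

-- B's per-column value, as a function of the column.
def pvF (shift : Int) (col : List String) : Int :=
  let idx := pvIdxN (· == "_") col
  if 0 ≤ shift ∧ shift ≤ (idx.length : Int) then
    (if shift < (idx.length : Int) then ((idx.getD shift.toNat 0 : Nat) : Int) else (col.length : Int))
      - (if 1 ≤ shift then ((idx.getD (shift.toNat - 1) 0 : Nat) : Int) else 0)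
  else 0

-- A's inner loop body as a function of the looked-up character.
def pvStepA (shift : Int) (st : Int × Int) (ch : String) : Int × Int :=
  let cu := st.1 + (if ch = "_" then (1 : Int) else 0)
  (cu, st.2 + (if cu = shift then (1 : Int) else 0))

theorem pvInnerA (shift : Int) (col : List String) (p cd : Int) :
    (col.foldl (pvStepA shift) (p, cd)).2 = cd + ((pvPrefixes p col).count shift : Int) := by
  induction col generalizing p cd with
  | nil => simp [pvPrefixes]
  | cons ch t ih =>
    simp only [List.foldl_cons, pvPrefixes, pvStepA, ih, List.count_cons]
    by_cases h : p + (if ch = "_" then (1 : Int) else 0) = shift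
    · simp [h]; ring
    · simp [h]

theorem pvRangeGet {α β : Type} (l : List α) (f : β → α → β) (b : β) (d : α) :
    (List.range l.length).foldl (fun st i => f st (l.getD i d)) b = l.foldl f b := by
  induction l generalizing b with
  | nil => simp
  | cons x t ih =>
    simp only [List.length_cons, List.range_succ_eq_map, List.foldl_cons, List.foldl_map,
      List.getD_cons_zero, List.getD_cons_succ]
    exact ih (f b x)

theorem pvColGet (liste : List (List String)) (col row : Nat) :
    ((liste.map (fun r => r.getD col "")).getD row "") = (liste.getD row []).getD col "" := by
  induction liste generalizing row with
  | nil => simp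
  | cons x t ih =>
    cases row with
    | zero => simp
    | succ n => simpa using ih n

theorem pvFilterRange (p : String → Bool) (l : List String) :
    (List.range l.length).filter (fun r => p (l.getD r "")) = pvIdxN p l := by
  induction l with
  | nil => simp [pvIdxN]
  | cons ch t ih =>
    rw [List.length_cons, List.range_succ_eq_map, List.filter_cons, List.filter_map]
    have hcomp : ((fun r => p ((ch :: t).getD r "")) ∘ Nat.succ) = fun r => p (t.getD r "") := by
      funext r; simp
    rw [hcomp, ih]
    by_cases h : p ch <;> simp [pvIdxN, h]

theorem pvPrefN_shift (t : List String) (p : Nat) :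
    pvPrefN p t = (pvPrefN 0 t).map (p + ·) := by
  induction t generalizing p with
  | nil => simp [pvPrefN]
  | cons ch t ih =>
    by_cases h : ch = "_"
    · have e1 : ∀ q, pvPrefN q (ch :: t) = (q + 1) :: pvPrefN (q + 1) t := by
        intro q; simp [pvPrefN, h]
      rw [e1 p, e1 0, List.map_cons, ih (p + 1), ih 1, List.map_map]
      refine congrArg₂ _ (by omega) ?_
      exact List.map_congr_left fun a _ => by simp [Nat.add_assoc]
    · have e1 : ∀ q, pvPrefN q (ch :: t) = q :: pvPrefN q t := by
        intro q; simp [pvPrefN, h]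
      rw [e1 p, e1 0, List.map_cons, ih p]
      simp

theorem pvCountMapSucc (l : List Nat) (k : Nat) :
    (l.map (1 + ·)).count k = if k = 0 then 0 else l.count (k - 1) := by
  induction l with
  | nil => simp
  | cons x t ih =>
    rw [List.map_cons, List.count_cons, ih]
    by_cases hk : k = 0
    · subst hk; simp
    · simp only [List.count_cons]
      simp [hk]
      split_ifs <;> omega

theorem pvGetDMapAdd (l : List Nat) (i : Nat) :
    (l.map (· + 1)).getD i 0 = if i < l.length then l.getD i 0 + 1 else 0 := by
  induction l generalizing i with
  | nil => simp
  | cons x t ih =>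
    cases i with
    | zero => simp
    | succ n => simpa using ih n

theorem pvCastCount (l : List Nat) (z : Int) :
    ((l.map Int.ofNat).count z) = if 0 ≤ z then l.count z.toNat else 0 := by
  induction l with
  | nil => simp
  | cons x t ih =>
    rw [List.map_cons, List.count_cons, ih]
    by_cases hz : 0 ≤ z
    · have hiff : ((x : Int) = z) ↔ (x = z.toNat) := by omega
      simp [hz, List.count_cons, hiff]
    · have hne : ¬ ((x : Int) = z) := by omega
      simp [hz, hne]

theorem pvPrefCast (col : List String) (p : Nat) :
    pvPrefixes (p : Int) col = (pvPrefN p col).map Int.ofNat := by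
  induction col generalizing p with
  | nil => simp [pvPrefixes, pvPrefN]
  | cons ch t ih =>
    by_cases h : ch = "_"
    · have hc : ((p : Int) + 1) = ((p + 1 : Nat) : Int) := by push_cast; ring
      simp only [pvPrefixes, pvPrefN, h, if_pos, hc]
      rw [ih (p + 1)]
      simp
    · simp only [pvPrefixes, pvPrefN, h, if_false]
      rw [show ((p : Int) + 0) = ((p : Nat) : Int) by ring, ih p]
      simp

-- B's per-column value with all comparisons over Nat.
def pvFN (k m n : Nat) (I : List Nat) : Int :=
  if k ≤ m then
    (if k < m then ((I.getD k 0 : Nat) : Int) else (n : Int))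
      - (if 1 ≤ k then ((I.getD (k - 1) 0 : Nat) : Int) else 0)
  else 0

theorem pvF_cast (col : List String) (k : Nat) :
    pvF (k : Int) col
      = pvFN k (pvIdxN (· == "_") col).length col.length (pvIdxN (· == "_") col) := by
  simp [pvF, pvFN]

-- pvFN recurrence for an underscore row (idx gains position 0, all others shift up).
theorem pvA1 (k n : Nat) (I : List Nat) :
    pvFN (k + 1) (I.length + 1) (n + 1) (0 :: I.map (· + 1))
      = (if k = 0 then 1 else 0) + pvFN k I.length n I := by
  cases k with
  | zero =>
    simp only [pvFN, pvGetDMapAdd, List.getD_cons_succ, List.getD_cons_zero,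
      Nat.add_sub_cancel]
    split_ifs <;> first | omega | simp_all
  | succ k2 =>
    simp only [pvFN, pvGetDMapAdd, List.getD_cons_succ, List.getD_cons_zero,
      Nat.add_sub_cancel]
    split_ifs <;> first | omega | simp_all

-- pvFN recurrence for a non-underscore row (positions shift up, count unchanged for k ≥ 1).
theorem pvA2 (k n : Nat) (I : List Nat) :
    pvFN k I.length (n + 1) (I.map (· + 1))
      = (if k = 0 then 1 else 0) + pvFN k I.length n I := by
  cases k with
  | zero =>
    simp only [pvFN, pvGetDMapAdd]
    split_ifs <;> first | omega | simp_all
  | succ k2 =>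
    simp only [pvFN, pvGetDMapAdd, Nat.add_sub_cancel]
    split_ifs <;> first | omega | simp_all

-- The central counting lemma: the number of prefix values equal to k is the
-- distance between the k-th and (k-1)-th occurrence positions.
theorem pvCountF (col : List String) (k : Nat) :
    ((pvPrefN 0 col).count k : Int)
      = pvFN k (pvIdxN (· == "_") col).length col.length (pvIdxN (· == "_") col) := by
  induction col generalizing k with
  | nil => cases k <;> simp [pvPrefN, pvIdxN, pvFN]
  | cons ch t ih =>
    by_cases h : ch = "_"
    · subst h
      have hpref : pvPrefN 0 ("_" :: t) = 1 :: (pvPrefN 0 t).map (1 + ·) := by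
        simp [pvPrefN, pvPrefN_shift t 1]
      have hidx : pvIdxN (· == "_") ("_" :: t)
          = 0 :: (pvIdxN (· == "_") t).map (· + 1) := by
        simp [pvIdxN]
      rw [hpref, hidx, List.count_cons, pvCountMapSucc]
      cases k with
      | zero => simp [pvFN]
      | succ k' =>
        have hlen : (0 :: (pvIdxN (· == "_") t).map (· + 1)).length
            = (pvIdxN (· == "_") t).length + 1 := by simp
        rw [hlen, List.length_cons, pvA1, ← ih k']
        by_cases hk0 : k' = 0 <;> simp [hk0] <;> push_cast <;> omega
    · have hpref : pvPrefN 0 (ch :: t) = 0 :: pvPrefN 0 t := by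
        simp [pvPrefN, h]
      have hidx : pvIdxN (· == "_") (ch :: t)
          = (pvIdxN (· == "_") t).map (· + 1) := by
        simp [pvIdxN, h]
      rw [hpref, hidx, List.count_cons]
      have hlen : ((pvIdxN (· == "_") t).map (· + 1)).length
          = (pvIdxN (· == "_") t).length := by simp
      rw [hlen, List.length_cons, pvA2, ← ih k]
      by_cases hk0 : k = 0 <;> simp [hk0] <;> push_cast <;> omega

-- Per column: A's running-counter tally equals B's occurrence-difference value.
theorem pvColEq (liste : List (List String)) (shift : Int) (c : Nat) :
    (((pvPrefixes 0 (liste.map (fun r => r.getD c ""))).count shift : Nat) : Int)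
      = pvF shift (liste.map (fun r => r.getD c "")) := by
  set col := liste.map (fun r => r.getD c "") with hcol
  have h0 : (0 : Int) = ((0 : Nat) : Int) := rfl
  rw [h0, pvPrefCast col 0]
  rw [pvCastCount]
  by_cases hz : 0 ≤ shift
  · have hsk : shift = ((shift.toNat : Nat) : Int) := by omega
    rw [if_pos hz, pvCountF col shift.toNat, ← pvF_cast col shift.toNat, ← hsk]
  · rw [if_neg hz]
    simp only [pvF]
    have hng : ¬ ((0:Int) ≤ shift ∧ shift ≤ ((pvIdxN (· == "_") col).length : Int)) := by
      intro hh; exact hz hh.1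
    simp [hng]

-- ===== VERDICT (by name: the statement is the Claim_ definition above) =====
theorem find_underscores_spec : Claim_equal_find_underscores := by
  intro liste shift _ _
  unfold Spec_find_underscores find_underscores find_underscores_alt
  congr 1
  apply PySem.List.foldl_congr_mem
  intro acc c _
  -- A's per-column body
  have hfun :
      (fun (st : Int × Int) row =>
        let count_underscore :=
          st.1 + (if (liste.getD row []).getD c "" = "_" then (1 : Int) else 0)
        (count_underscore,
          st.2 + (if count_underscore = shift then (1 : Int) else 0))) =
      (fun (st : Int × Int) (row : Nat) =>
        pvStepA shift st ((liste.map (fun r => r.getD c "")).getD row "")) := by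
    funext st row
    simp only [pvStepA, pvColGet]
  have hlen : liste.length = (liste.map (fun r => r.getD c "")).length := by simp
  rw [hfun, hlen,
    pvRangeGet (liste.map (fun r => r.getD c "")) (pvStepA shift) ((0:Int), acc) "",
    pvInnerA, pvColEq liste shift c]
  -- B's per-column body
  have hfilt : (List.range liste.length).filter
      (fun r => (liste.getD r []).getD c "" == "_")
      = pvIdxN (· == "_") (liste.map (fun r => r.getD c "")) := by
    rw [hlen]
    have : (fun r => (liste.getD r []).getD c "" == "_")
        = fun r => ((liste.map (fun r' => r'.getD c "")).getD r "" == "_") := by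
      funext r; rw [pvColGet]
    rw [this]
    exact pvFilterRange (· == "_") (liste.map (fun r => r.getD c ""))
  simp only [hfilt, pvF, List.length_map, ← hlen]
  split_ifs <;> ring
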